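-- pv_equiv track=rewrite | github.com/dgunzy/python-poker | solver2.py | group_by_highest_card
-- ===== SOURCE A (Python) =====
-- def group_by_highest_card(combinations):
--     grouped_combinations = {}
--     for combo in combinations:
--         highest_card = max(combo)
--         if highest_card not in grouped_combinations:
--             grouped_combinations[highest_card] = [combo]
--         else:
--             grouped_combinations[highest_card].append(combo)
--
--     return grouped_combinations
-- ===== SOURCE B (Python) =====
-- def group_by_highest_card(combinations):
--     # Alternative decomposition: first collect the distinct keys (highest cards)
--     # in first-occurrence order, then build each group by filtering the input.
--     keys = list(dict.fromkeys(map(max, combinations)))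
--     return {k: [c for c in combinations if max(c) == k] for k in keys}
-- ===== Notes on version B (the rewrite author's own statement) =====
-- stated objective: alternative
-- what changed: Replaces the single-pass dict accumulation (insert-or-append per combo) by a two-phase scheme: dedup the max-values once to get the keys in first-occurrence order, then build each group with a filter comprehension over the input.
import Mathlib
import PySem

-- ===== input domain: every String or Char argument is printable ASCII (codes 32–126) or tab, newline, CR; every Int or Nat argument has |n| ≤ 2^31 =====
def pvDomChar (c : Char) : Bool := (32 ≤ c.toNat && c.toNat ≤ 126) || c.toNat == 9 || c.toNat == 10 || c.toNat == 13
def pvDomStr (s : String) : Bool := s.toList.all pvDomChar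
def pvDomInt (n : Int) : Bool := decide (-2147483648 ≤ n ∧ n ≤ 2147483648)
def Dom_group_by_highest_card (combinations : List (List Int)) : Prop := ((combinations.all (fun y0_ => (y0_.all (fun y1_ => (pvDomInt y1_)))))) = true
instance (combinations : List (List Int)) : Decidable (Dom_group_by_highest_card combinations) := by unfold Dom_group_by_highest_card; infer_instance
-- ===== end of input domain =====

-- B builds the grouping in two phases (dedup the max-keys, then filter per key) instead of A's
-- single-pass dict accumulation; equal association lists, no speed claim.


-- ===== PORT A =====
def group_by_highest_card (combinations : List (List Int)) : List (Int × List (List Int)) :=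
  (combinations.foldl (fun grouped combo =>
      let highest_card : Int := (PySem.List.max? combo (fun x => x)).getD 0
      if !grouped.contains highest_card then grouped.insert highest_card [combo]
      else grouped.modify highest_card [] (fun v => v ++ [combo]))
    PySem.Dict.empty).items

-- ===== PORT B =====
def group_by_highest_card_alt (combinations : List (List Int)) : List (Int × List (List Int)) :=
  let keys := PySem.List.dedup (combinations.map (fun c => (PySem.List.max? c (fun x => x)).getD 0))
  keys.map (fun k => (k, combinations.filter (fun c => (PySem.List.max? c (fun x => x)).getD 0 == k)))

-- ===== PRECONDITION & SPEC =====
-- Pre_ excludes inputs containing an empty combination, on which Python's max of an empty sequence raises ValueError (in A and in B alike).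
def Pre_group_by_highest_card (combinations : List (List Int)) : Prop :=
  ∀ c ∈ combinations, c ≠ []
instance (combinations : List (List Int)) : Decidable (Pre_group_by_highest_card combinations) := by unfold Pre_group_by_highest_card; infer_instance
def pvWitness_group_by_highest_card : List (List Int) := [[1, 3], [3, 2], [2]]
def Spec_group_by_highest_card (combinations : List (List Int)) (out : List (Int × List (List Int))) : Prop := out = group_by_highest_card_alt combinations
instance (combinations : List (List Int)) (out : List (Int × List (List Int))) : Decidable (Spec_group_by_highest_card combinations out) := by unfold Spec_group_by_highest_card; infer_instance

-- ===== CLAIM (what is proved, stated in full; the proofs are below) =====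
def Claim_equal_group_by_highest_card : Prop := ∀ (combinations : List (List Int)), Dom_group_by_highest_card combinations → Pre_group_by_highest_card combinations → Spec_group_by_highest_card combinations (group_by_highest_card combinations)

-- ===== LEMMAS AND PROOFS =====

-- max(combo) with the 0 default (unreachable under Pre_)
def pvKey (c : List Int) : Int := (PySem.List.max? c (fun x => x)).getD 0

-- A's insert-or-append step is exactly Dict.modify with default [].
theorem pv_step_eq (d : PySem.Dict Int (List (List Int))) (c : List Int) :
    (if !d.contains (pvKey c) then d.insert (pvKey c) [c]
     else d.modify (pvKey c) [] (fun v => v ++ [c]))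
    = d.modify (pvKey c) [] (fun v => v ++ [c]) := by
  by_cases h : d.contains (pvKey c) = true
  · simp [h]
  · simp only [Bool.not_eq_true] at h
    have h1 : d.modify (pvKey c) [] (fun v => v ++ [c]) = d.insert (pvKey c) ((fun v => v ++ [c]) (d.getD (pvKey c) [])) := rfl
    rw [h1, PySem.Dict.getD_of_not_contains d [] h]
    simp [h]

-- The accumulated dict, as a fold of modifys over (key, combo) pairs.
theorem pv_fold_eq (combinations : List (List Int)) :
    combinations.foldl (fun grouped combo =>
      let highest_card : Int := (PySem.List.max? combo (fun x => x)).getD 0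
      if !grouped.contains highest_card then grouped.insert highest_card [combo]
      else grouped.modify highest_card [] (fun v => v ++ [combo])) PySem.Dict.empty
    = (combinations.map (fun c => (pvKey c, c))).foldl
        (fun d p => d.modify p.1 [] (fun v => v ++ [p.2])) PySem.Dict.empty := by
  rw [List.foldl_map]
  exact List.foldl_ext _ _ _ (fun d c _ => pv_step_eq d c)

theorem group_by_highest_card_spec : Claim_equal_group_by_highest_card := by
  intro combinations _ _
  unfold Spec_group_by_highest_card group_by_highest_card group_by_highest_card_alt
  rw [pv_fold_eq]
  set pairs := combinations.map (fun c => (pvKey c, c)) with hpairs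
  set D := pairs.foldl (fun d p => d.modify p.1 [] (fun v => v ++ [p.2])) PySem.Dict.empty with hD
  have hkeys : D.keys = PySem.List.dedup (combinations.map (fun c => (PySem.List.max? c (fun x => x)).getD 0)) := by
    rw [hD, hpairs, List.foldl_map]
    rw [PySem.Dict.keys_foldl_modify_key combinations (fun c => pvKey c) [] (fun d c => fun v => v ++ [c]) PySem.Dict.empty]
    simp only [pvKey]
    rw [PySem.List.dedup_eq_ofList]
    rfl
  have hnodup : D.keys.Nodup := by
    rw [hD, hpairs, List.foldl_map]
    exact PySem.Dict.nodup_keys_foldl_modify_key combinations (fun c => pvKey c) [] (fun d c => fun v => v ++ [c]) PySem.Dict.empty PySem.Dict.nodup_keys_empty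
  have hget : ∀ k : Int, D.getD k [] = combinations.filter (fun c => (PySem.List.max? c (fun x => x)).getD 0 == k) := by
    intro k
    rw [hD, PySem.Dict.getD_foldl_modify_append, PySem.Dict.getD_empty]
    rw [hpairs, List.filter_map, List.map_map]
    simp [pvKey, Function.comp_def]
  rw [PySem.Dict.items_eq_map_keys D hnodup [], hkeys]
  exact List.map_congr_left (fun k _ => by rw [hget k])
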